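-- pv_equiv track=rewrite | github.com/aalopes/atomicCI | functions.py | maxCoinc
-- ===== SOURCE A (Python) =====
-- def maxCoinc(braNpart,ketNpart):
--     """
--         Checks in how many spin-orbitals they differ and return that value.
--         Return as well these spin-orbitals (the ones from the bra and the ones
--         from the ket) and the sign that comes out of the transposition
--         operations necessary to put bra and ket into maximal coincidence
--     """
--
--     # Need to write what every variable represents
--     ndiffSO     = 0
--     diffBraSO   = []
--     diffKetSO   = []
--     identElems  = []
--     auxBra      = braNpart[:]
--     auxKet      = ketNpart[:]
--     nTransp     = 0
--     sgn         = 1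
--
--     # If they are the same state, then skip the calculation
--     if braNpart == ketNpart:
--         return ndiffSO, diffBraSO, diffKetSO, identElems, sgn
--
--     # Checking how many different SO there are between the bra and the ket -
--     # note that if they differ in more than 2 then the integrals we are
--     # interested in will be 0. Therefore we can skip the transposition.
--     for soBra in braNpart:
--         if soBra not in ketNpart:
--             ndiffSO = ndiffSO + 1
--             if ndiffSO == 3: # Note that if they differ in 3 or more the
--             # integrals are immediately 0, so we let ndiffSO = 3 even if
--             # they differ in more than 3 SO.
--                 return ndiffSO, diffBraSO, diffKetSO, identElems, sgn
--
--     # This is how I'll do it: I'll keep the Bra fixed and transpose the Ket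
--     # elements (while keeping track of the number of transpositions) until it is
--     # into maximal coincidence with the Bra.
--     # One or two spin-orbitals will be different between the Bra and the Ket.
--     # One must then extract them and if there are two, we must keep them in the
--     # right order.
--
--     # Extract the identical elements - one can do the extraction of the
--     # identical elements and the calculation of ndiffSO in one loop
--     for soBra in braNpart:
--         if soBra in ketNpart:
--             identElems.append(soBra)
--     # Now order the auxKet so it is in maximal coincidence with the Bra
--     for element in identElems:
--         if braNpart.index(element) == auxKet.index(element): # right position, skip
--             continue
--         else:
--             idxBra          = braNpart.index(element)
--             idxKet          = auxKet.index(element)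
--             # transpose elements
--             auxKet[idxKet]  = auxKet[idxBra]
--             auxKet[idxBra]  = element
--             sgn = -1*sgn
--     # now we only need to extract the different SO (in the right order)
--     for i in range(len(braNpart)):
--         soBra = braNpart[i]
--         if soBra not in auxKet:
--             diffBraSO.append(braNpart[i])
--             diffKetSO.append(auxKet[i])
--     return ndiffSO, diffBraSO, diffKetSO, identElems, sgn
-- ===== SOURCE B (Python) =====
-- def maxCoinc(braNpart, ketNpart):
--     # Direct construction instead of transposition simulation: identical
--     # orbitals keep their bra slots, each differing ket orbital is located by
--     # following its displacement chain, and the sign is read off as the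
--     # inversion parity of the ket -> target position permutation.
--     if braNpart == ketNpart:
--         return 0, [], [], [], 1
--     ketSet = set(ketNpart)
--     diffBraSO = [x for x in braNpart if x not in ketSet]
--     if len(diffBraSO) >= 3:
--         return 3, [], [], [], 1
--     identElems = [x for x in braNpart if x in ketSet]
--     braPos = {x: i for i, x in enumerate(braNpart)}
--     diffPos = [i for i, x in enumerate(braNpart) if x not in ketSet]
--     target = list(braNpart)
--     for p in diffPos:
--         q = p
--         for _ in range(len(ketNpart)):  # a displacement chain never revisits a slot
--             if ketNpart[q] in braPos:
--                 q = braPos[ketNpart[q]]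
--             else:
--                 break
--         target[p] = ketNpart[q]
--     diffKetSO = [target[p] for p in diffPos]
--     posT = {v: i for i, v in enumerate(target)}
--     perm = [posT[v] for v in ketNpart]
--     inv = 0
--     for i in range(len(perm)):
--         for j in range(i + 1, len(perm)):
--             if perm[j] < perm[i]:
--                 inv += 1
--     sgn = 1 if inv % 2 == 0 else -1
--     return len(diffBraSO), diffBraSO, diffKetSO, identElems, sgn
-- ===== Notes on version B (the rewrite author's own statement) =====
-- stated objective: alternative
-- what changed: Instead of A's count-then-transpose simulation (repeated list scans and pairwise swaps with a running sign), B builds the maximally-coincident arrangement directly - identical orbitals keep their bra slots and each differing ket orbital is found by following its displacement chain via a position dict - and obtains the sign as the inversion parity of the ket-to-target position permutation; no transpositions are performed.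
-- outside the precondition, e.g. on maxCoinc([2, 0, 2], [2, 0, 3]): A returns (0, [], [], [2, 0, 2], 1), B raises KeyError; on maxCoinc([1, 2], [1]): A raises IndexError, B raises IndexError
import Mathlib
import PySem

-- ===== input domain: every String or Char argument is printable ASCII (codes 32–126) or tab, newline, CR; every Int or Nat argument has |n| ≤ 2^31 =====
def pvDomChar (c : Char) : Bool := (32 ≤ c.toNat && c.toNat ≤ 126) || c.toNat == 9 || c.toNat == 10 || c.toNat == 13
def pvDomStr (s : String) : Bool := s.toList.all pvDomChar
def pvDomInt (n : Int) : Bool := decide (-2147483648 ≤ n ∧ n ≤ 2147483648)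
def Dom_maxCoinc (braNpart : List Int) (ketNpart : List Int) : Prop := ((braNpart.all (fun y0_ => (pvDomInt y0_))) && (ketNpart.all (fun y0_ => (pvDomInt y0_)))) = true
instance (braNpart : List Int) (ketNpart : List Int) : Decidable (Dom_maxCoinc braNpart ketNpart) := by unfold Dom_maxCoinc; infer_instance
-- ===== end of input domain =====

-- B replaces A's count-then-transpose simulation by a direct construction: identical orbitals
-- keep their bra slots, each differing ket orbital is located by following its displacement
-- chain, and the sign is the inversion parity of the ket->target position permutation.
-- A mutates no argument (it copies ketNpart), so return-value equivalence is the whole story.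


-- ===== PORT A =====
-- first loop: count bra orbitals missing from ket, early return (none) when the count hits 3
def mcCountA (ket : List Int) : List Int → Int → Option Int
  | [], n => some n
  | x :: xs, n =>
    if x ∈ ket then mcCountA ket xs n
    else if n + 1 = 3 then none
    else mcCountA ket xs (n + 1)

-- third loop: put auxKet into maximal coincidence with bra, one transposition at a time
-- (.index → PySem.List.index?; Python's ValueError/IndexError cases, impossible under
-- Pre_maxCoinc, are defaulted with getD)
def mcSwapA (bra : List Int) : List Int → List Int → Int → List Int × Int
  | [], aux, sgn => (aux, sgn)
  | e :: es, aux, sgn =>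
    if (PySem.List.index? bra e).getD 0 = (PySem.List.index? aux e).getD 0 then
      mcSwapA bra es aux sgn
    else
      let idxBra := (PySem.List.index? bra e).getD 0
      let idxKet := (PySem.List.index? aux e).getD 0
      let v := PySem.List.pyGetD aux (idxBra : Int) 0
      mcSwapA bra es ((aux.set idxKet v).set idxBra e) (-1 * sgn)

def maxCoinc (braNpart : List Int) (ketNpart : List Int) : Int × List Int × List Int × List Int × Int :=
  if braNpart = ketNpart then (0, [], [], [], 1)
  else
    match mcCountA ketNpart braNpart 0 with
    | none => (3, [], [], [], 1)
    | some ndiffSO =>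
      let identElems := braNpart.filter (fun soBra => decide (soBra ∈ ketNpart))
      let as := mcSwapA braNpart identElems ketNpart 1
      -- fourth loop: for i in range(len(braNpart)) extract the differing orbitals
      let ds := (PySem.List.pyRange 0 (braNpart.length : Int) 1).foldl
        (fun (acc : List Int × List Int) i =>
          let soBra := PySem.List.pyGetD braNpart i 0
          if soBra ∈ as.1 then acc
          else (acc.1 ++ [soBra], acc.2 ++ [PySem.List.pyGetD as.1 i 0]))
        ([], [])
      (ndiffSO, ds.1, ds.2, identElems, as.2)

-- ===== PORT B =====
-- {x: i for i, x in enumerate(xs)}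
def mcPosDict (xs : List Int) : PySem.Dict Int Int :=
  (PySem.List.enumerate xs 0).foldl (fun d p => d.insert p.2 p.1) PySem.Dict.empty

-- displacement-chain walk: for _ in range(len(ketNpart)): if ketNpart[q] in braPos:
-- q = braPos[ketNpart[q]] else: break   (indexing defaulted; in range under Pre_maxCoinc)
def mcChainB (ketNpart : List Int) (braPos : PySem.Dict Int Int) : Nat → Int → Int
  | 0, q => q
  | fuel + 1, q =>
    match braPos.get? (PySem.List.pyGetD ketNpart q 0) with
    | some r => mcChainB ketNpart braPos fuel r
    | none => q

def maxCoinc_alt (braNpart : List Int) (ketNpart : List Int) : Int × List Int × List Int × List Int × Int :=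
  if braNpart = ketNpart then (0, [], [], [], 1)
  else
    let ketSet := PySem.Set.ofList ketNpart
    let diffBraSO := braNpart.filter (fun x => !(PySem.Set.contains ketSet x))
    if 3 ≤ diffBraSO.length then (3, [], [], [], 1)
    else
      let identElems := braNpart.filter (fun x => PySem.Set.contains ketSet x)
      let braPos := mcPosDict braNpart
      let diffPos := ((PySem.List.enumerate braNpart 0).filter
        (fun p => !(PySem.Set.contains ketSet p.2))).map (·.1)
      -- for p in diffPos: follow the chain from p, then target[p] = ketNpart[q]
      let target := diffPos.foldl (fun t p =>
        t.set p.toNat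
          (PySem.List.pyGetD ketNpart (mcChainB ketNpart braPos ketNpart.length p) 0)) braNpart
      let diffKetSO := diffPos.map (fun p => PySem.List.pyGetD target p 0)
      let posT := mcPosDict target
      let perm := ketNpart.map (fun v => posT.getD v 0)   -- KeyError impossible under Pre_
      -- inversion count of the position permutation
      let inv := (PySem.List.pyRange 0 (perm.length : Int) 1).foldl (fun acc i =>
        (PySem.List.pyRange (i + 1) (perm.length : Int) 1).foldl (fun acc2 j =>
          if PySem.List.pyGetD perm j 0 < PySem.List.pyGetD perm i 0 then acc2 + 1 else acc2)
          acc) (0 : Int)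
      let sgn : Int := if PySem.Int.mod inv 2 = 0 then 1 else -1
      ((diffBraSO.length : Int), diffBraSO, diffKetSO, identElems, sgn)

-- ===== PRECONDITION & SPEC =====
-- Pre_ admits equal bra/ket, any pair differing in >= 3 orbitals (both return immediately), and
-- all well-formed determinants (equal length, no duplicated spin-orbital); it excludes only the
-- remaining ill-formed pairs, where the programs can raise (IndexError/KeyError) or A's
-- first-occurrence list.index swaps yield an accidental value that is not worth specifying.
def Pre_maxCoinc (braNpart : List Int) (ketNpart : List Int) : Prop :=
  braNpart = ketNpart ∨
  3 ≤ (braNpart.filter (fun x => decide (x ∉ ketNpart))).length ∨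
  (braNpart.length = ketNpart.length ∧ braNpart.Nodup ∧ ketNpart.Nodup)
instance (braNpart : List Int) (ketNpart : List Int) : Decidable (Pre_maxCoinc braNpart ketNpart) := by
  unfold Pre_maxCoinc; infer_instance

def pvWitness_maxCoinc : List Int × List Int := ([1, 2, 3], [3, 2, 4])

def Spec_maxCoinc (braNpart : List Int) (ketNpart : List Int) (out : Int × List Int × List Int × List Int × Int) : Prop := out = maxCoinc_alt braNpart ketNpart
instance (braNpart : List Int) (ketNpart : List Int) (out : Int × List Int × List Int × List Int × Int) : Decidable (Spec_maxCoinc braNpart ketNpart out) := by unfold Spec_maxCoinc; infer_instance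

-- ===== CLAIM (what is proved, stated in full; the proofs are below) =====
def Claim_equal_maxCoinc : Prop := ∀ (braNpart : List Int) (ketNpart : List Int), Dom_maxCoinc braNpart ketNpart → Pre_maxCoinc braNpart ketNpart → Spec_maxCoinc braNpart ketNpart (maxCoinc braNpart ketNpart)

-- ===== LEMMAS AND PROOFS =====

-- fuel-bounded displacement-chain walk used by the proofs: from slot q, repeatedly step to
-- the bra slot of the value currently at q; `some v` = the chain reached a value outside bra
def wval (bra a : List Int) : Nat → Nat → Option Int
  | 0, q =>
    match PySem.List.index? bra (a.getD q 0) with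
    | none => some (a.getD q 0)
    | some _ => none
  | fuel + 1, q =>
    match PySem.List.index? bra (a.getD q 0) with
    | none => some (a.getD q 0)
    | some r => wval bra a fuel r

def swapNat (l : List Nat) (i j : Nat) : List Nat := (l.set j (l.getD i 0)).set i (l.getD j 0)

def invNat : List Nat → Nat
  | [] => 0
  | x :: xs => xs.countP (fun y => decide (y < x)) + invNat xs

def qlist (t a : List Int) : List Nat := a.map (fun v => (PySem.List.index? t v).getD 0)

def mcPar (t a : List Int) : Int := (-1 : Int) ^ invNat (qlist t a)

theorem wval_mono (bra a : List Int) :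
    ∀ f q v, wval bra a f q = some v → wval bra a (f + 1) q = some v := by
  intro f
  induction f with
  | zero =>
    intro q v h
    unfold wval at h ⊢
    cases hx : PySem.List.index? bra (a.getD q 0) with
    | none => rw [hx] at h; exact h
    | some r => rw [hx] at h; exact absurd h (by simp)
  | succ f ih =>
    intro q v h
    unfold wval at h ⊢
    cases hx : PySem.List.index? bra (a.getD q 0) with
    | none => rw [hx] at h; exact h
    | some r => rw [hx] at h; exact ih r v h

theorem wval_le (bra a : List Int) {f g : Nat} (hfg : f ≤ g) :
    ∀ q v, wval bra a f q = some v → wval bra a g q = some v := by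
  induction g with
  | zero =>
    intro q v h
    rw [Nat.le_zero.mp hfg] at h
    exact h
  | succ g ih =>
    intro q v h
    by_cases hf : f = g + 1
    · rwa [hf] at h
    · exact wval_mono bra a g q v (ih (by omega) q v h)

theorem mcPosDict_get?_of_not_mem (xs : List Int) :
    ∀ (s : Int) (d : PySem.Dict Int Int) (v : Int), v ∉ xs →
    ((PySem.List.enumerate xs s).foldl (fun d p => d.insert p.2 p.1) d).get? v = d.get? v := by
  induction xs with
  | nil => intro s d v _; simp [PySem.List.enumerate]
  | cons x t ih =>
    intro s d v hv
    rw [PySem.List.enumerate_cons]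
    simp only [List.foldl_cons]
    simp only [List.mem_cons, not_or] at hv
    rw [ih (s+1) _ v hv.2]
    exact PySem.Dict.get?_insert_of_ne _ _ hv.1

theorem mcPosDict_get?_of_mem (xs : List Int) :
    ∀ (s : Int) (d : PySem.Dict Int Int) (v : Int), xs.Nodup → v ∈ xs →
    ((PySem.List.enumerate xs s).foldl (fun d p => d.insert p.2 p.1) d).get? v =
      some (s + ((PySem.List.index? xs v).getD 0 : Nat)) := by
  induction xs with
  | nil => intro s d v _ hv; simp at hv
  | cons x t ih =>
    intro s d v hnd hv
    rw [PySem.List.enumerate_cons]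
    simp only [List.foldl_cons]
    by_cases hx : v = x
    · subst hx
      have hnt : v ∉ t := by simp at hnd; exact hnd.1
      rw [mcPosDict_get?_of_not_mem t (s+1) _ v hnt]
      rw [PySem.Dict.get?_insert_self]
      rw [PySem.List.index?_cons_self]
      simp
    · have hvt : v ∈ t := by rcases List.mem_cons.1 hv with h | h; exact absurd h hx; exact h
      rw [ih (s+1) _ v (List.Nodup.of_cons hnd) hvt]
      rw [PySem.List.index?_cons_of_ne t (fun h => hx (Eq.symm h))]
      have : (PySem.List.index? t v).isSome := (PySem.List.index?_isSome_iff _ _).2 hvt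
      rcases Option.isSome_iff_exists.1 this with ⟨k, hk⟩
      rw [hk]
      simp
      ring

theorem mcPosDict_get? (xs : List Int) (hnd : xs.Nodup) (v : Int) :
    (mcPosDict xs).get? v = (PySem.List.index? xs v).map (fun k => ((k : Nat) : Int)) := by
  by_cases hv : v ∈ xs
  · rw [mcPosDict, mcPosDict_get?_of_mem xs 0 _ v hnd hv]
    obtain ⟨k, hk⟩ : ∃ k, PySem.List.index? xs v = some k :=
      Option.isSome_iff_exists.1 ((PySem.List.index?_isSome_iff _ _).2 hv)
    rw [hk]; simp
  · rw [mcPosDict, mcPosDict_get?_of_not_mem xs 0 _ v hv]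
    rw [(PySem.List.index?_eq_none_iff _ _).2 hv]
    rfl

theorem index?_nodup_getElem (l : List Int) (hnd : l.Nodup) (i : Nat) (hi : i < l.length) :
    PySem.List.index? l l[i] = some i := by
  rw [PySem.List.index?_eq_some_iff]
  refine ⟨l.take i, l.drop (i+1), ?_, by simp [Nat.le_of_lt hi], ?_⟩
  · conv_lhs => rw [← List.take_append_drop i l, List.drop_eq_getElem_cons hi]
  · intro hmem
    rcases List.mem_take_iff_getElem.1 hmem with ⟨j, hj, hje⟩
    have : j ≠ i := by omega
    exact this (List.Nodup.getElem_inj_iff hnd |>.1 hje)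

-- unfolding helpers for wval
theorem wval_step_none (bra a : List Int) (q : Nat)
    (h : PySem.List.index? bra (a.getD q 0) = none) :
    ∀ f, wval bra a f q = some (a.getD q 0) := by
  intro f; cases f <;> simp only [wval, h]

theorem wval_zero_some (bra a : List Int) (q r : Nat)
    (h : PySem.List.index? bra (a.getD q 0) = some r) :
    wval bra a 0 q = none := by
  simp only [wval, h]

theorem wval_step_some (bra a : List Int) (f q r : Nat)
    (h : PySem.List.index? bra (a.getD q 0) = some r) :
    wval bra a (f + 1) q = wval bra a f r := by
  simp only [wval, h]

theorem getD_append_lt {α : Type} {d : α} (l : List α) (x : α) (m : Nat)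
    (h : m < l.length) : (l ++ [x]).getD m d = l.getD m d := by
  rw [List.getD_eq_getElem?_getD, List.getD_eq_getElem?_getD, List.getElem?_append_left h]

theorem getD_append_len {α : Type} {d : α} (l : List α) (x : α) :
    (l ++ [x]).getD l.length d = x := by
  rw [List.getD_eq_getElem?_getD]
  simp

theorem nodup_lt_length_le (M : List Nat) (n : Nat) (hnd : M.Nodup)
    (hlt : ∀ x ∈ M, x < n) : M.length ≤ n := by
  have h1 : M.length = M.toFinset.card := (List.toFinset_card_of_nodup hnd).symm
  have h2 : M.toFinset ⊆ Finset.range n := by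
    intro x hx
    exact Finset.mem_range.2 (hlt x (List.mem_toFinset.1 hx))
  calc M.length = M.toFinset.card := h1
    _ ≤ (Finset.range n).card := Finset.card_le_card h2
    _ = n := Finset.card_range n

-- walk termination (pigeonhole): the visited-slot list M is a simple path, so the walk
-- reaches a value outside bra before the fuel runs out
theorem wval_exists_aux (bra a : List Int) (ha : a.Nodup) (hlen : a.length = bra.length)
    (p : Nat) (hstart : bra.getD p 0 ∉ a) :
    ∀ (f : Nat) (M : List Nat),
      M ≠ [] → M.Nodup → (∀ x ∈ M, x < a.length) →
      (∀ m : Nat, m + 1 < M.length →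
        PySem.List.index? bra (a.getD (M.getD m 0) 0) = some (M.getD (m + 1) 0)) →
      M.getD 0 0 = p →
      a.length + 1 ≤ f + M.length →
      ∃ v, wval bra a f (M.getD (M.length - 1) 0) = some v := by
  intro f
  induction f with
  | zero =>
    intro M hne hnd hbound _ _ hbud
    exact absurd (nodup_lt_length_le M a.length hnd hbound) (by omega)
  | succ f ih =>
    intro M hne hnd hbound hedge hhead hbud
    set q := M.getD (M.length - 1) 0 with hq
    have hMlen : 0 < M.length := List.length_pos_iff.2 hne
    have hqa : q < a.length := by
      apply hbound
      rw [hq]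
      have : M.length - 1 < M.length := by omega
      rw [List.getD_eq_getElem (hn := this)]
      exact List.getElem_mem this
    cases hx : PySem.List.index? bra (a.getD q 0) with
    | none => exact ⟨a.getD q 0, wval_step_none bra a q hx (f + 1)⟩
    | some r =>
      obtain ⟨hrb, hbr, -⟩ := PySem.List.getElem_of_index?_eq_some hx
      have hra : r < a.length := by omega
      have hbrD : bra.getD r 0 = a.getD q 0 := by
        rw [List.getD_eq_getElem (hn := hrb)]; exact hbr
      -- r is a fresh slot: it cannot be the start (no predecessor) nor any visited slot
      have hrM : r ∉ M := by
        intro hmem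
        obtain ⟨m, hm, hMm⟩ := List.mem_iff_getElem.1 hmem
        have hMmD : M.getD m 0 = r := by rw [List.getD_eq_getElem (hn := hm)]; exact hMm
        cases m with
        | zero =>
          -- r = p, but the start slot has no predecessor: bra[p] is not a value of a
          apply hstart
          rw [← hhead, hMmD, hbrD]
          have : a.getD q 0 = a[q] := List.getD_eq_getElem (d := 0) (hn := hqa)
          rw [this]
          exact List.getElem_mem hqa
        | succ m' =>
          -- r already has the chain predecessor M[m']; by injectivity it equals q,
          -- which sits at the last position: contradiction with M.Nodup
          have hedge' := hedge m' (by omega)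
          rw [hMmD] at hedge'
          obtain ⟨hm2, hbr2, -⟩ := PySem.List.getElem_of_index?_eq_some hedge'
          have ht : M.getD m' 0 < a.length := by
            apply hbound
            have : m' < M.length := by omega
            rw [List.getD_eq_getElem (hn := this)]
            exact List.getElem_mem this
          have hvals : a.getD (M.getD m' 0) 0 = a.getD q 0 := by
            rw [← hbrD, List.getD_eq_getElem (hn := hrb)]
            exact hbr2.symm
          have hpos : M.getD m' 0 = q := by
            have h2 : a[M.getD m' 0] = a[q] := by
              rw [← List.getD_eq_getElem (hn := ht), ← List.getD_eq_getElem (hn := hqa)]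
              exact hvals
            exact (List.Nodup.getElem_inj_iff ha).1 h2
          have hm'lt : m' < M.length := by omega
          have hlast : M.length - 1 < M.length := by omega
          have : m' = M.length - 1 := by
            apply (List.Nodup.getElem_inj_iff hnd).1
            rw [← List.getD_eq_getElem (hn := hm'lt), ← List.getD_eq_getElem (hn := hlast)]
            exact hpos
          omega
      -- extend the path by r and recurse
      rw [show wval bra a (f + 1) q = wval bra a f r from wval_step_some bra a f q r hx]
      have hres := ih (M ++ [r]) (by simp) (by
          rw [List.nodup_append]
          refine ⟨hnd, List.nodup_singleton r, ?_⟩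
          intro x hx y hy hxy
          apply hrM
          rw [hxy, List.mem_singleton.1 hy] at hx
          exact hx)
        (by
          intro x hxm
          rcases List.mem_append.1 hxm with h | h
          · exact hbound x h
          · simp at h; omega)
        (by
          intro m hm
          simp only [List.length_append, List.length_singleton] at hm
          by_cases hcase : m + 1 < M.length
          · rw [getD_append_lt M r m (by omega), getD_append_lt M r (m + 1) hcase]
            exact hedge m hcase
          · have hmeq : m = M.length - 1 := by omega
            have : m + 1 = M.length := by omega
            rw [getD_append_lt M r m (by omega), this, getD_append_len M r, hmeq]
            exact hx)
        (by rw [getD_append_lt M r 0 hMlen]; exact hhead)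
        (by simp; omega)
      simpa [getD_append_len] using hres

-- walk termination: from a slot whose bra value is outside ket the chain is a simple path
theorem wval_exists (bra a : List Int) (ha : a.Nodup)
    (hlen : a.length = bra.length) (p : Nat) (hp : p < a.length)
    (hstart : bra.getD p 0 ∉ a) :
    ∃ v, wval bra a a.length p = some v := by
  have := wval_exists_aux bra a ha hlen p hstart a.length [p] (by simp)
    (List.nodup_singleton p) (by simpa using hp) (by intro m hm; simp at hm)
    (by simp) (by simp)
  simpa using this

-- chain-endpoint values are invariant under one of A's transpositions
theorem wval_swap (bra a : List Int) (_hb : bra.Nodup) (ha : a.Nodup)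
    (hlen : a.length = bra.length) (e : Int) (i j : Nat)
    (hi : PySem.List.index? bra e = some i) (hj : PySem.List.index? a e = some j)
    (hij : i ≠ j) :
    ∀ f p v, p < a.length → p ≠ i → wval bra a f p = some v →
      wval bra ((a.set j (a.getD i 0)).set i e) f p = some v := by
  obtain ⟨hib, hbi, -⟩ := PySem.List.getElem_of_index?_eq_some hi
  obtain ⟨hja, haj, -⟩ := PySem.List.getElem_of_index?_eq_some hj
  have hia : i < a.length := by omega
  set w := a.getD i 0 with hw
  set a' := (a.set j w).set i e with ha'
  have hA'j : a'.getD j 0 = w := by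
    rw [List.getD_eq_getElem?_getD, ha', List.getElem?_set_ne hij,
      List.getElem?_set_self hja, Option.getD_some]
  have hA'p : ∀ p, p ≠ i → p ≠ j → a'.getD p 0 = a.getD p 0 := by
    intro p hpi hpj
    rw [List.getD_eq_getElem?_getD, ha', List.getElem?_set_ne (fun h => hpi h.symm),
      List.getElem?_set_ne (fun h => hpj h.symm), ← List.getD_eq_getElem?_getD]
  have hgDj : a.getD j 0 = e := by rw [List.getD_eq_getElem (hn := hja)]; exact haj
  have hbiD : bra.getD i 0 = e := by rw [List.getD_eq_getElem (hn := hib)]; exact hbi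
  intro f
  induction f using Nat.strong_induction_on with
  | _ f IH =>
    intro p v hpa hpi hwv
    by_cases hpj : p = j
    · subst hpj
      -- the chain in a goes p -> i and then on; in a' it skips i
      have hxp : PySem.List.index? bra (a.getD p 0) = some i := by rw [hgDj]; exact hi
      obtain ⟨f', rfl⟩ : ∃ f', f = f' + 1 := by
        cases f with
        | zero => rw [wval_zero_some bra a p i hxp] at hwv; cases hwv
        | succ f' => exact ⟨f', rfl⟩
      rw [wval_step_some bra a f' p i hxp] at hwv
      -- hwv : wval bra a f' i = some v
      cases hwx : PySem.List.index? bra w with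
      | none =>
        have := wval_step_none bra a i (by rw [← hw]; exact hwx) f'
        rw [this] at hwv
        rw [wval_step_none bra a' p (by rw [hA'j]; exact hwx) (f' + 1), hA'j, hw]
        exact hwv
      | some s' =>
        have hxs : PySem.List.index? bra (a.getD i 0) = some s' := by rw [← hw]; exact hwx
        obtain ⟨f'', rfl⟩ : ∃ f'', f' = f'' + 1 := by
          cases f' with
          | zero => rw [wval_zero_some bra a i s' hxs] at hwv; cases hwv
          | succ f'' => exact ⟨f'', rfl⟩
        rw [wval_step_some bra a f'' i s' hxs] at hwv
        obtain ⟨hsb, hbs, -⟩ := PySem.List.getElem_of_index?_eq_some hwx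
        have hsa : s' < a.length := by omega
        have hsi : s' ≠ i := by
          intro hcon
          apply hij
          have hbs' : bra.getD s' 0 = w := by rw [List.getD_eq_getElem (hn := hsb)]; exact hbs
          rw [hcon] at hbs'
          have h1 : a.getD i 0 = a.getD p 0 := by
            rw [hgDj, ← hbiD, hbs', hw]
          have h2 : a[i] = a[p] := by
            rw [← List.getD_eq_getElem (hn := hia), ← List.getD_eq_getElem (hn := hja)]
            exact h1
          exact (List.Nodup.getElem_inj_iff ha).1 h2
        have hrec := IH f'' (by omega) s' v hsa hsi hwv
        have hrec' := wval_le bra a' (show f'' ≤ f'' + 1 by omega) s' v hrec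
        rw [wval_step_some bra a' (f'' + 1) p s' (by rw [hA'j]; exact hwx)]
        exact hrec'
    · -- p is not touched by the transposition
      have hval : a'.getD p 0 = a.getD p 0 := hA'p p hpi hpj
      cases hx : PySem.List.index? bra (a.getD p 0) with
      | none =>
        rw [wval_step_none bra a p hx f] at hwv
        rw [wval_step_none bra a' p (by rw [hval]; exact hx) f, hval]
        exact hwv
      | some s =>
        obtain ⟨f', rfl⟩ : ∃ f', f = f' + 1 := by
          cases f with
          | zero => rw [wval_zero_some bra a p s hx] at hwv; cases hwv
          | succ f' => exact ⟨f', rfl⟩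
        rw [wval_step_some bra a f' p s hx] at hwv
        obtain ⟨hsb, hbs, -⟩ := PySem.List.getElem_of_index?_eq_some hx
        have hsa : s < a.length := by omega
        have hsi : s ≠ i := by
          intro hcon
          apply hpj
          have hbs' : bra.getD s 0 = a.getD p 0 := by
            rw [List.getD_eq_getElem (hn := hsb)]; exact hbs
          rw [hcon, hbiD] at hbs'
          have h2 : a[p] = a[j] := by
            rw [← List.getD_eq_getElem (hn := hpa), ← List.getD_eq_getElem (hn := hja),
              ← hbs', hgDj]
          exact (List.Nodup.getElem_inj_iff ha).1 h2
        rw [wval_step_some bra a' f' p s (by rw [hval]; exact hx)]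
        exact IH f' (by omega) s v hsa hsi hwv

-- characterisation of A's transposition loop: result is a permutation of ket with every
-- identical orbital at its bra slot, and with unchanged chain-endpoint values
theorem mcSwapA_char (bra ket : List Int) (hb : bra.Nodup) (tv : Nat → Int) :
    ∀ (es a : List Int) (sgn : Int),
      a.Nodup → a.Perm ket → a.length = bra.length →
      (∀ e ∈ es, e ∈ bra) → (∀ e ∈ es, e ∈ ket) →
      (∀ e, e ∈ bra → e ∈ ket → e ∉ es →
        a.getD ((PySem.List.index? bra e).getD 0) 0 = e) →
      (∀ p, p < bra.length → bra.getD p 0 ∉ ket →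
        wval bra a bra.length p = some (tv p)) →
      (mcSwapA bra es a sgn).1.Nodup ∧ (mcSwapA bra es a sgn).1.Perm ket ∧
      (∀ e, e ∈ bra → e ∈ ket →
        (mcSwapA bra es a sgn).1.getD ((PySem.List.index? bra e).getD 0) 0 = e) ∧
      (∀ p, p < bra.length → bra.getD p 0 ∉ ket →
        wval bra (mcSwapA bra es a sgn).1 bra.length p = some (tv p)) := by
  intro es
  induction es with
  | nil =>
    intro a sgn ha hperm hlen _ _ hplaced hchain
    exact ⟨ha, hperm, fun e heb hek => hplaced e heb hek (by simp), hchain⟩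
  | cons e es ih =>
    intro a sgn ha hperm hlen hesb hesk hplaced hchain
    have heb : e ∈ bra := hesb e (by simp)
    have hek : e ∈ ket := hesk e (by simp)
    have hea : e ∈ a := hperm.mem_iff.2 hek
    obtain ⟨i, hi⟩ : ∃ i, PySem.List.index? bra e = some i :=
      Option.isSome_iff_exists.1 ((PySem.List.index?_isSome_iff _ _).2 heb)
    obtain ⟨j, hj⟩ : ∃ j, PySem.List.index? a e = some j :=
      Option.isSome_iff_exists.1 ((PySem.List.index?_isSome_iff _ _).2 hea)
    obtain ⟨hib, hbi, -⟩ := PySem.List.getElem_of_index?_eq_some hi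
    obtain ⟨hja, haj, -⟩ := PySem.List.getElem_of_index?_eq_some hj
    have hia : i < a.length := by omega
    have hgDj : a.getD j 0 = e := by rw [List.getD_eq_getElem (hn := hja)]; exact haj
    by_cases hij : i = j
    · -- indices already agree: skip
      have hstep : mcSwapA bra (e :: es) a sgn = mcSwapA bra es a sgn := by
        conv_lhs => rw [mcSwapA]
        rw [hi, hj]
        simp only [Option.getD_some]
        rw [if_pos hij]
      rw [hstep]
      refine ih a sgn ha hperm hlen (fun e' h => hesb e' (List.mem_cons_of_mem _ h))
        (fun e' h => hesk e' (List.mem_cons_of_mem _ h)) ?_ hchain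
      intro e' heb' hek' hes'
      by_cases hee : e' = e
      · subst hee
        rw [hi, Option.getD_some, hij, hgDj]
      · exact hplaced e' heb' hek' (by simp [hes', hee])
    · -- transpose
      set w := a.getD i 0 with hw
      set a' := (a.set j w).set i e with ha'
      have hstep : mcSwapA bra (e :: es) a sgn = mcSwapA bra es a' (-1 * sgn) := by
        conv_lhs => rw [mcSwapA]
        rw [hi, hj]
        simp only [Option.getD_some]
        rw [if_neg hij]
        simp only [PySem.List.pyGetD_natCast, ha', hw]
      rw [hstep]
      have hpermaa : a'.Perm a := by
        rw [ha', hw, List.getD_eq_getElem (hn := hia), ← haj]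
        exact List.set_set_perm hja hia
      have ha'nd : a'.Nodup := hpermaa.symm.nodup ha
      have hlen' : a'.length = bra.length := by simp [ha']; omega
      have hA'i : a'.getD i 0 = e := by
        rw [List.getD_eq_getElem?_getD, ha', List.getElem?_set_self (by simp; omega),
          Option.getD_some]
      have hA'p : ∀ p, p ≠ i → p ≠ j → a'.getD p 0 = a.getD p 0 := by
        intro p hpi hpj
        rw [List.getD_eq_getElem?_getD, ha', List.getElem?_set_ne (fun h => hpi h.symm),
          List.getElem?_set_ne (fun h => hpj h.symm), ← List.getD_eq_getElem?_getD]
      refine ih a' (-1 * sgn) ha'nd (hpermaa.trans hperm) hlen'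
        (fun e' h => hesb e' (List.mem_cons_of_mem _ h))
        (fun e' h => hesk e' (List.mem_cons_of_mem _ h)) ?_ ?_
      · -- placement survives the transposition
        intro e' heb' hek' hes'
        by_cases hee : e' = e
        · subst hee
          rw [hi, Option.getD_some, hA'i]
        · have hold := hplaced e' heb' hek' (by simp [hes', hee])
          obtain ⟨i', hi'⟩ : ∃ i', PySem.List.index? bra e' = some i' :=
            Option.isSome_iff_exists.1 ((PySem.List.index?_isSome_iff _ _).2 heb')
          obtain ⟨hib', hbi', -⟩ := PySem.List.getElem_of_index?_eq_some hi'
          rw [hi', Option.getD_some] at hold ⊢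
          have hbi'D : bra.getD i' 0 = e' := by
            rw [List.getD_eq_getElem (hn := hib')]; exact hbi'
          have hbiD : bra.getD i 0 = e := by
            rw [List.getD_eq_getElem (hn := hib)]; exact hbi
          have h1 : i' ≠ i := by
            intro hcon
            apply hee
            rw [← hbi'D, hcon, hbiD]
          have h2 : i' ≠ j := by
            intro hcon
            apply hee
            rw [← hold, hcon, hgDj]
          rw [hA'p i' h1 h2]
          exact hold
      · -- chain-endpoint values survive the transposition
        intro p hp hpk
        have hpi : p ≠ i := by
          intro hcon
          apply hpk
          rw [hcon, List.getD_eq_getElem (hn := hib), hbi]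
          exact hek
        exact wval_swap bra a hb ha (by omega) e i j hi hj hij bra.length p (tv p)
          (by omega) hpi (hchain p hp hpk)

theorem length_swapNat (l : List Nat) (i j : Nat) : (swapNat l i j).length = l.length := by
  simp [swapNat]

theorem swapNat_perm (l : List Nat) (i j : Nat) (hi : i < l.length) (hj : j < l.length) :
    (swapNat l i j).Perm l := by
  rw [swapNat, List.getD_eq_getElem (hn := hi), List.getD_eq_getElem (hn := hj)]
  exact List.set_set_perm hj hi

theorem getD_swapNat (l : List Nat) (i j : Nat) (hi : i < l.length) (hj : j < l.length) (m : Nat) :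
    (swapNat l i j).getD m 0 =
      if m = i then l.getD j 0 else if m = j then l.getD i 0 else l.getD m 0 := by
  by_cases hmi : m = i
  · subst hmi
    rw [if_pos rfl, swapNat, List.getD_eq_getElem?_getD,
      List.getElem?_set_self (by simp; omega), Option.getD_some]
  · rw [if_neg hmi]
    by_cases hmj : m = j
    · subst hmj
      rw [if_pos rfl, swapNat, List.getD_eq_getElem?_getD,
        List.getElem?_set_ne (fun h => hmi h.symm),
        List.getElem?_set_self hj, Option.getD_some]
    · rw [if_neg hmj, swapNat, List.getD_eq_getElem?_getD,
        List.getElem?_set_ne (fun h => hmi h.symm),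
        List.getElem?_set_ne (fun h => hmj h.symm), ← List.getD_eq_getElem?_getD]

theorem swapNat_comm (l : List Nat) (i j : Nat) (hij : i ≠ j) :
    swapNat l i j = swapNat l j i := by
  rw [swapNat, swapNat]
  apply List.set_comm
  omega

theorem swapNat_conj (l : List Nat) (i j : Nat) (hij : i + 1 < j) (hj : j < l.length) :
    swapNat (swapNat (swapNat l i (i + 1)) (i + 1) j) i (i + 1) = swapNat l i j := by
  have hi : i < l.length := by omega
  have hi1 : i + 1 < l.length := by omega
  have l1 : (swapNat l i (i + 1)).length = l.length := length_swapNat l i (i + 1)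
  have l2 : (swapNat (swapNat l i (i + 1)) (i + 1) j).length = l.length := by
    rw [length_swapNat, length_swapNat]
  have key : ∀ m, (swapNat (swapNat (swapNat l i (i + 1)) (i + 1) j) i (i + 1)).getD m 0 =
      (swapNat l i j).getD m 0 := by
    intro m
    rw [getD_swapNat _ i (i + 1) (by omega) (by omega) m]
    simp only [getD_swapNat (swapNat l i (i + 1)) (i + 1) j (by omega) (by omega)]
    simp only [getD_swapNat l i (i + 1) hi hi1]
    rw [getD_swapNat l i j hi hj m]
    split_ifs <;> (try subst_vars) <;> first | rfl | omega
  apply List.ext_getElem (by rw [length_swapNat, l2, length_swapNat])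
  intro m hm1 hm2
  rw [← List.getD_eq_getElem (d := 0), ← List.getD_eq_getElem (d := 0)]
  exact key m

theorem invNat_swap_adj : ∀ (l : List Nat) (i : Nat), l.Nodup → i + 1 < l.length →
    invNat (swapNat l i (i + 1)) % 2 = (invNat l + 1) % 2 := by
  intro l
  induction l with
  | nil => intro i _ h; simp at h
  | cons z l' ih =>
    intro i hnd hlen
    cases i with
    | zero =>
      cases l' with
      | nil => simp at hlen
      | cons y v =>
        have hzy : z ≠ y := by
          intro h
          rw [List.nodup_cons] at hnd
          exact hnd.1 (h ▸ List.mem_cons_self)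
        have hrep : swapNat (z :: y :: v) 0 1 = y :: z :: v := by
          simp [swapNat]
        rw [hrep]
        simp only [invNat, List.countP_cons]
        rcases lt_or_gt_of_ne hzy with h | h
        · have h1 : decide (z < y) = true := by simpa using h
          have h2 : decide (y < z) = false := by simp; omega
          rw [h1, h2]
          simp
          omega
        · have h1 : decide (z < y) = false := by simp; omega
          have h2 : decide (y < z) = true := by simpa using h
          rw [h1, h2]
          simp
          omega
    | succ k =>
      have hlen' : k + 1 < l'.length := by simpa using hlen
      have hrep : swapNat (z :: l') (k + 1) (k + 1 + 1) = z :: swapNat l' k (k + 1) := by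
        simp [swapNat]
      rw [hrep]
      simp only [invNat]
      have hperm : (swapNat l' k (k + 1)).Perm l' :=
        swapNat_perm l' k (k + 1) (by omega) hlen'
      rw [hperm.countP_eq]
      have := ih k (List.Nodup.of_cons hnd) hlen'
      omega

theorem invNat_swap_lt : ∀ (d : Nat) (l : List Nat) (i j : Nat), l.Nodup → i < j →
    j < l.length → j - i - 1 = d → invNat (swapNat l i j) % 2 = (invNat l + 1) % 2 := by
  intro d
  induction d with
  | zero =>
    intro l i j hnd hij hj hd
    have : j = i + 1 := by omega
    subst this
    exact invNat_swap_adj l i hnd hj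
  | succ d ih =>
    intro l i j hnd hij hj hd
    have hij1 : i + 1 < j := by omega
    rw [← swapNat_conj l i j hij1 hj]
    have hi1 : i + 1 < l.length := by omega
    have p1 : invNat (swapNat l i (i + 1)) % 2 = (invNat l + 1) % 2 :=
      invNat_swap_adj l i hnd hi1
    have hnd1 : (swapNat l i (i + 1)).Nodup :=
      (swapNat_perm l i (i + 1) (by omega) hi1).symm.nodup hnd
    have p2 : invNat (swapNat (swapNat l i (i + 1)) (i + 1) j) % 2 =
        (invNat (swapNat l i (i + 1)) + 1) % 2 :=
      ih (swapNat l i (i + 1)) (i + 1) j hnd1 hij1 (by rw [length_swapNat]; exact hj) (by omega)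
    have hnd2 : (swapNat (swapNat l i (i + 1)) (i + 1) j).Nodup :=
      (swapNat_perm _ (i + 1) j (by rw [length_swapNat]; omega)
        (by rw [length_swapNat]; exact hj)).symm.nodup hnd1
    have p3 : invNat (swapNat (swapNat (swapNat l i (i + 1)) (i + 1) j) i (i + 1)) % 2 =
        (invNat (swapNat (swapNat l i (i + 1)) (i + 1) j) + 1) % 2 :=
      invNat_swap_adj _ i hnd2 (by rw [length_swapNat, length_swapNat]; omega)
    omega

theorem invNat_swap_parity (l : List Nat) (hl : l.Nodup) (i j : Nat) (hij : i ≠ j)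
    (hi : i < l.length) (hj : j < l.length) :
    invNat (swapNat l i j) % 2 = (invNat l + 1) % 2 := by
  rcases Nat.lt_or_ge i j with h | h
  · exact invNat_swap_lt (j - i - 1) l i j hl h hj rfl
  · have hji : j < i := by omega
    rw [swapNat_comm l i j hij]
    exact invNat_swap_lt (i - j - 1) l j i hl hji hi rfl

theorem qlist_length (t a : List Int) : (qlist t a).length = a.length := by simp [qlist]

theorem qlist_getD (t a : List Int) (m : Nat) (hm : m < a.length) :
    (qlist t a).getD m 0 = (PySem.List.index? t (a.getD m 0)).getD 0 := by
  rw [qlist, List.getD_eq_getElem (hn := by simpa using hm), List.getElem_map,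
    List.getD_eq_getElem (hn := hm)]

theorem qlist_nodup (t a : List Int) (_ht : t.Nodup) (ha : a.Nodup)
    (hsub : ∀ v ∈ a, v ∈ t) : (qlist t a).Nodup := by
  refine List.Nodup.map_on ?_ ha
  intro x hx y hy hfxy
  obtain ⟨kx, hkx⟩ : ∃ k, PySem.List.index? t x = some k :=
    Option.isSome_iff_exists.1 ((PySem.List.index?_isSome_iff _ _).2 (hsub x hx))
  obtain ⟨ky, hky⟩ : ∃ k, PySem.List.index? t y = some k :=
    Option.isSome_iff_exists.1 ((PySem.List.index?_isSome_iff _ _).2 (hsub y hy))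
  obtain ⟨hkxt, htx, -⟩ := PySem.List.getElem_of_index?_eq_some hkx
  obtain ⟨hkyt, hty, -⟩ := PySem.List.getElem_of_index?_eq_some hky
  rw [hkx, hky, Option.getD_some, Option.getD_some] at hfxy
  subst hfxy
  rw [← htx, ← hty]

theorem neg_one_pow_flip {m k : Nat} (h : m % 2 = (k + 1) % 2) :
    (-1 : Int) ^ m = -((-1 : Int) ^ k) := by
  rcases Nat.even_or_odd k with hk | hk
  · have hm : Odd m := by
      rw [Nat.even_iff] at hk
      rw [Nat.odd_iff]
      omega
    rw [Odd.neg_one_pow hm, Even.neg_one_pow hk]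
  · have hm : Even m := by
      rw [Nat.odd_iff] at hk
      rw [Nat.even_iff]
      omega
    rw [Even.neg_one_pow hm, Odd.neg_one_pow hk]
    norm_num

-- the sign: each executed transposition flips the inversion parity of the position permutation
theorem mcSwapA_sign (bra t : List Int) (_hb : bra.Nodup) (ht : t.Nodup) :
    ∀ (es a : List Int) (sgn : Int),
      a.Nodup → a.Perm t → a.length = bra.length →
      (∀ e ∈ es, e ∈ bra) → (∀ e ∈ es, e ∈ a) →
      (mcSwapA bra es a sgn).2 * mcPar t (mcSwapA bra es a sgn).1 = sgn * mcPar t a := by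
  intro es
  induction es with
  | nil => intro a sgn _ _ _ _ _; rfl
  | cons e es ih =>
    intro a sgn ha hperm hlen hesb hesa
    have heb : e ∈ bra := hesb e (by simp)
    have hea : e ∈ a := hesa e (by simp)
    obtain ⟨i, hi⟩ : ∃ i, PySem.List.index? bra e = some i :=
      Option.isSome_iff_exists.1 ((PySem.List.index?_isSome_iff _ _).2 heb)
    obtain ⟨j, hj⟩ : ∃ j, PySem.List.index? a e = some j :=
      Option.isSome_iff_exists.1 ((PySem.List.index?_isSome_iff _ _).2 hea)
    obtain ⟨hib, hbi, -⟩ := PySem.List.getElem_of_index?_eq_some hi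
    obtain ⟨hja, haj, -⟩ := PySem.List.getElem_of_index?_eq_some hj
    have hia : i < a.length := by omega
    have hgDj : a.getD j 0 = e := by rw [List.getD_eq_getElem (hn := hja)]; exact haj
    by_cases hij : i = j
    · have hstep : mcSwapA bra (e :: es) a sgn = mcSwapA bra es a sgn := by
        conv_lhs => rw [mcSwapA]
        rw [hi, hj]
        simp only [Option.getD_some]
        rw [if_pos hij]
      rw [hstep]
      exact ih a sgn ha hperm hlen (fun e' h => hesb e' (List.mem_cons_of_mem _ h))
        (fun e' h => hesa e' (List.mem_cons_of_mem _ h))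
    · set w := a.getD i 0 with hw
      set a' := (a.set j w).set i e with ha'
      have hstep : mcSwapA bra (e :: es) a sgn = mcSwapA bra es a' (-1 * sgn) := by
        conv_lhs => rw [mcSwapA]
        rw [hi, hj]
        simp only [Option.getD_some]
        rw [if_neg hij]
        simp only [PySem.List.pyGetD_natCast, ha', hw]
      rw [hstep]
      have hpermaa : a'.Perm a := by
        rw [ha', hw, List.getD_eq_getElem (hn := hia), ← haj]
        exact List.set_set_perm hja hia
      have ha'nd : a'.Nodup := hpermaa.symm.nodup ha
      have hlen' : a'.length = bra.length := by simp [ha']; omega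
      -- the position permutation of a' is that of a with entries i and j swapped
      have hql : qlist t a' = swapNat (qlist t a) i j := by
        rw [ha', qlist, List.map_set, List.map_set, ← qlist, swapNat]
        congr 1
        · congr 1
          rw [qlist_getD t a i hia, hw]
        · rw [qlist_getD t a j hja, hgDj]
      have hQnd : (qlist t a).Nodup :=
        qlist_nodup t a ht ha (fun v hv => hperm.mem_iff.1 hv)
      have hpar : mcPar t a' = -(mcPar t a) := by
        rw [mcPar, mcPar, hql]
        exact neg_one_pow_flip (invNat_swap_parity (qlist t a) hQnd i j hij
          (by rw [qlist_length]; omega) (by rw [qlist_length]; omega))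
      have hrec := ih a' (-1 * sgn) ha'nd (hpermaa.trans hperm) hlen'
        (fun e' h => hesb e' (List.mem_cons_of_mem _ h))
        (fun e' h => hpermaa.mem_iff.2 (hesa e' (List.mem_cons_of_mem _ h)))
      rw [hrec, hpar]
      ring

theorem invNat_of_pairwise (l : List Nat) (h : l.Pairwise (· < ·)) : invNat l = 0 := by
  induction l with
  | nil => rfl
  | cons x xs ih =>
    rw [List.pairwise_cons] at h
    unfold invNat
    rw [ih h.2, List.countP_eq_zero.2 (fun y hy => by simpa using Nat.not_lt.2 (Nat.le_of_lt (h.1 y hy)))]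

theorem mcCountA_eq (ket : List Int) :
    ∀ (l : List Int) (n : Int), 0 ≤ n → n ≤ 2 →
    mcCountA ket l n =
      if n + ((l.filter (fun x => decide (x ∉ ket))).length : Int) < 3 then
        some (n + ((l.filter (fun x => decide (x ∉ ket))).length : Int))
      else none := by
  intro l
  induction l with
  | nil => intro n h0 h2; simp [mcCountA]; omega
  | cons x xs ih =>
    intro n h0 h2
    by_cases hx : x ∈ ket
    · rw [show mcCountA ket (x :: xs) n = mcCountA ket xs n by
          conv_lhs => rw [mcCountA]
          rw [if_pos hx]]
      rw [ih n h0 h2]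
      simp [hx]
    · by_cases h3 : n + 1 = 3
      · rw [show mcCountA ket (x :: xs) n = none by
          conv_lhs => rw [mcCountA]
          rw [if_neg hx, if_pos h3]]
        rw [if_neg (by
          simp only [List.filter_cons, hx, not_false_eq_true, decide_true, if_true]
          rw [List.length_cons]
          push_cast
          omega)]
      · rw [show mcCountA ket (x :: xs) n = mcCountA ket xs (n + 1) by
          conv_lhs => rw [mcCountA]
          rw [if_neg hx, if_neg h3]]
        rw [ih (n + 1) (by omega) (by omega)]
        simp only [List.filter_cons, hx, not_false_eq_true, decide_true, if_true]
        rw [List.length_cons]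
        push_cast
        split_ifs with c1 c2 c3 <;> first | (congr 1; omega) | rfl

theorem mcExtract_gen (bra aux : List Int) :
    ∀ (m : Nat), m ≤ bra.length → ∀ (u v : List Int),
    ((List.range m).map (fun k => ((0:Int) + (k : Nat)))).foldl
        (fun (acc : List Int × List Int) i =>
          let soBra := PySem.List.pyGetD bra i 0
          if soBra ∈ aux then acc
          else (acc.1 ++ [soBra], acc.2 ++ [PySem.List.pyGetD aux i 0]))
        (u, v) =
      (u ++ (bra.take m).filter (fun x => !decide (x ∈ aux)),
        v ++ ((PySem.List.enumerate (bra.take m) 0).filter (fun p => !decide (p.2 ∈ aux))).map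
          (fun p => PySem.List.pyGetD aux p.1 0)) := by
  intro m
  induction m with
  | zero => intro _ u v; simp
  | succ m ih =>
    intro hm u v
    have hmlt : m < bra.length := hm
    rw [List.range_succ, List.map_append, List.foldl_append, ih (Nat.le_of_lt hmlt)]
    have htake : bra.take (m+1) = bra.take m ++ [bra[m]] := by
      rw [List.take_add_one, List.getElem?_eq_getElem hmlt]; rfl
    have hlen_take : (bra.take m).length = m := List.length_take_of_le (Nat.le_of_lt hmlt)
    have hget : PySem.List.pyGetD bra ((0:Int) + (m : Nat)) 0 = bra[m] := by
      rw [zero_add, PySem.List.pyGetD_natCast, List.getD_eq_getElem (hn := hmlt)]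
    rw [htake]
    simp only [List.map_cons, List.map_nil, List.foldl_cons, List.foldl_nil]
    rw [PySem.List.enumerate_append, hlen_take]
    by_cases hmem : bra[m] ∈ aux
    · simp only [hget, List.filter_append, List.filter_cons, List.filter_nil,
        PySem.List.enumerate_cons, PySem.List.enumerate_nil,
        hmem, decide_true, Bool.not_true, Bool.false_eq_true, if_false, if_true, List.append_nil]
    · simp only [hget, List.filter_append, List.filter_cons, List.filter_nil,
        List.map_append, List.map_cons, PySem.List.enumerate_cons,
        PySem.List.enumerate_nil, hmem, decide_false, Bool.not_false, if_true, if_false,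
        List.append_assoc, List.map_nil]

theorem contains_ofList_eq (ket : List Int) (x : Int) :
    PySem.Set.contains (PySem.Set.ofList ket) x = decide (x ∈ ket) := by
  by_cases h : x ∈ ket
  · rw [(PySem.Set.contains_iff _ x).2 ((PySem.Set.mem_ofList ket x).2 h)]
    simp [h]
  · have : ¬ PySem.Set.contains (PySem.Set.ofList ket) x = true :=
      fun hc => h ((PySem.Set.mem_ofList ket x).1 ((PySem.Set.contains_iff _ x).1 hc))
    simp only [Bool.not_eq_true] at this
    rw [this, decide_eq_false h]

theorem qlist_self (t : List Int) (ht : t.Nodup) : qlist t t = List.range t.length := by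
  apply List.ext_getElem (by simp [qlist])
  intro m h1 h2
  simp only [qlist, List.getElem_map, List.getElem_range]
  rw [index?_nodup_getElem t ht m (by simpa [qlist] using h1)]
  rfl

theorem int_mod_cast_two (k : Nat) : PySem.Int.mod (k : Int) 2 = ((k % 2 : Nat) : Int) := by
  simp [PySem.Int.mod, Int.fmod_eq_emod]

theorem neg_one_pow_if (k : Nat) :
    (if PySem.Int.mod ((k : Nat) : Int) 2 = 0 then (1 : Int) else -1) = (-1 : Int) ^ k := by
  rw [int_mod_cast_two]
  rcases Nat.even_or_odd k with hk | hk
  · rw [Even.neg_one_pow hk, if_pos (by rw [Nat.even_iff] at hk; rw [hk]; rfl)]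
  · rw [Odd.neg_one_pow hk, if_neg (by rw [Nat.odd_iff] at hk; rw [hk]; simp)]

-- B's bounded chain loop computes the same endpoint value as the proof-level walk
theorem mcChainB_eq (bra ket : List Int) (hb : bra.Nodup) (hlen : ket.length = bra.length) :
    ∀ (f : Nat) (q : Nat) (v : Int), q < ket.length →
      wval bra ket f q = some v → ∀ (g : Nat), f ≤ g →
      PySem.List.pyGetD ket (mcChainB ket (mcPosDict bra) g (q : Int)) 0 = v := by
  intro f
  induction f with
  | zero =>
    intro q v hq hwv g _
    cases hx : PySem.List.index? bra (ket.getD q 0) with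
    | some r => rw [wval_zero_some bra ket q r hx] at hwv; cases hwv
    | none =>
      rw [wval_step_none bra ket q hx 0] at hwv
      have hstay : mcChainB ket (mcPosDict bra) g (q : Int) = (q : Int) := by
        cases g with
        | zero => rfl
        | succ g' =>
          rw [mcChainB, PySem.List.pyGetD_natCast, mcPosDict_get? bra hb, hx]
          rfl
      rw [hstay, PySem.List.pyGetD_natCast]
      exact Option.some.inj hwv
  | succ f ih =>
    intro q v hq hwv g hg
    cases hx : PySem.List.index? bra (ket.getD q 0) with
    | none =>
      rw [wval_step_none bra ket q hx (f + 1)] at hwv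
      have hstay : mcChainB ket (mcPosDict bra) g (q : Int) = (q : Int) := by
        cases g with
        | zero => rfl
        | succ g' =>
          rw [mcChainB, PySem.List.pyGetD_natCast, mcPosDict_get? bra hb, hx]
          rfl
      rw [hstay, PySem.List.pyGetD_natCast]
      exact Option.some.inj hwv
    | some r =>
      rw [wval_step_some bra ket f q r hx] at hwv
      obtain ⟨hrb, -, -⟩ := PySem.List.getElem_of_index?_eq_some hx
      obtain ⟨g', rfl⟩ : ∃ g', g = g' + 1 := by
        cases g with
        | zero => omega
        | succ g' => exact ⟨g', rfl⟩
      rw [mcChainB, PySem.List.pyGetD_natCast, mcPosDict_get? bra hb, hx]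
      exact ih r v (by omega) hwv g' (by omega)

-- the update loop 'for p in ps: t[p] = g(p)' pointwise
theorem foldl_set_getD (g : Int → Int) :
    ∀ (ps : List Int) (l0 : List Int) (m : Nat),
      (∀ p ∈ ps, 0 ≤ p ∧ p.toNat < l0.length) →
      ((ps.foldl (fun t p => t.set p.toNat (g p)) l0).getD m 0 =
        if (m : Int) ∈ ps then g m else l0.getD m 0) ∧
      (ps.foldl (fun t p => t.set p.toNat (g p)) l0).length = l0.length := by
  intro ps
  induction ps with
  | nil => intro l0 m _; simp
  | cons p0 ps ih =>
    intro l0 m hps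
    obtain ⟨hp0, hp0len⟩ := hps p0 (by simp)
    simp only [List.foldl_cons]
    obtain ⟨ihg, ihl⟩ := ih (l0.set p0.toNat (g p0)) m (by
      intro p hp
      obtain ⟨h1, h2⟩ := hps p (List.mem_cons_of_mem _ hp)
      exact ⟨h1, by simpa using h2⟩)
    refine ⟨?_, by rw [ihl]; simp⟩
    rw [ihg]
    by_cases hmem : (m : Int) ∈ ps
    · rw [if_pos hmem, if_pos (List.mem_cons_of_mem _ hmem)]
    · rw [if_neg hmem]
      by_cases hm0 : (m : Int) = p0
      · have hmt : p0.toNat = m := by omega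
        rw [if_pos (by rw [← hm0]; exact List.mem_cons_self), List.getD_eq_getElem?_getD,
          hmt, List.getElem?_set_self (by omega), Option.getD_some, hm0]
      · rw [if_neg (by
            intro hc
            rcases List.mem_cons.1 hc with h | h
            · exact hm0 h
            · exact hmem h),
          List.getD_eq_getElem?_getD, List.getElem?_set_ne (by omega),
          ← List.getD_eq_getElem?_getD]

theorem sum_map_cast (l : List Nat) (g : Nat → Nat) :
    (l.map (fun k => ((g k : Nat) : Int))).sum = (((l.map g).sum : Nat) : Int) := by
  induction l with
  | nil => rfl
  | cons x xs ih => simp [ih]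

theorem invNat_eq_sum (Q : List Nat) :
    ((List.range Q.length).map
      (fun k => (Q.drop (k + 1)).countP (fun y => decide (y < Q.getD k 0)))).sum = invNat Q := by
  induction Q with
  | nil => rfl
  | cons x xs ih =>
    rw [List.length_cons, List.range_succ_eq_map, List.map_cons, List.map_map, List.sum_cons]
    have hcong : ∀ k,
        ((x :: xs).drop (k + 1 + 1)).countP (fun y => decide (y < (x :: xs).getD (k + 1) 0)) =
        (xs.drop (k + 1)).countP (fun y => decide (y < xs.getD k 0)) := by
      intro k
      rw [List.drop_succ_cons, List.getD_cons_succ]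
    calc (xs.drop 0).countP (fun y => decide (y < (x :: xs).getD 0 0)) +
          ((List.range xs.length).map (fun k =>
            ((x :: xs).drop (k + 1 + 1)).countP
              (fun y => decide (y < (x :: xs).getD (k + 1) 0)))).sum
        = xs.countP (fun y => decide (y < x)) +
          ((List.range xs.length).map (fun k =>
            (xs.drop (k + 1)).countP (fun y => decide (y < xs.getD k 0)))).sum := by
          rw [List.drop_zero, List.getD_cons_zero]
          try congr 1
          try exact congrArg List.sum (List.map_congr_left (fun k _ => hcong k))
      _ = invNat (x :: xs) := by rw [ih]; rfl

-- B's nested index loop computes invNat of the underlying Nat permutation list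
theorem invLoop_eq (Q : List Nat) :
    (PySem.List.pyRange 0 ((Q.map (fun k : Nat => (k : Int))).length : Int) 1).foldl
      (fun acc i =>
        (PySem.List.pyRange (i + 1) ((Q.map (fun k : Nat => (k : Int))).length : Int) 1).foldl
          (fun acc2 j =>
            if PySem.List.pyGetD (Q.map (fun k : Nat => (k : Int))) j 0 <
                PySem.List.pyGetD (Q.map (fun k : Nat => (k : Int))) i 0 then acc2 + 1 else acc2)
          acc) (0 : Int) = (invNat Q : Int) := by
  set L := Q.map (fun k : Nat => (k : Int)) with hL
  have hLQ : L.length = Q.length := by simp [hL]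
  have hinner : ∀ (i : Int) (acc : Int), 0 ≤ i →
      (PySem.List.pyRange (i + 1) (L.length : Int) 1).foldl
        (fun acc2 j =>
          if PySem.List.pyGetD L j 0 < PySem.List.pyGetD L i 0 then acc2 + 1 else acc2) acc =
      acc + ((L.drop (i + 1).toNat).countP
        (fun y => decide (y < PySem.List.pyGetD L i 0)) : Int) := by
    intro i acc hi
    rw [PySem.List.foldl_pyRange_pyGetD' L 0
      (fun acc2 y => if y < PySem.List.pyGetD L i 0 then acc2 + 1 else acc2) acc (by omega)]
    try exact PySem.List.foldl_ite_add_one _ _ _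
  have houter := PySem.List.foldl_congr_mem
    (l := PySem.List.pyRange 0 ((Q.map (fun k : Nat => (k : Int))).length : Int) 1)
    (init := (0 : Int))
    (f := fun acc i =>
      (PySem.List.pyRange (i + 1) ((Q.map (fun k : Nat => (k : Int))).length : Int) 1).foldl
        (fun acc2 j =>
          if PySem.List.pyGetD (Q.map (fun k : Nat => (k : Int))) j 0 <
              PySem.List.pyGetD (Q.map (fun k : Nat => (k : Int))) i 0 then acc2 + 1 else acc2)
        acc)
    (g := fun acc i => acc +
      ((L.drop (i + 1).toNat).countP (fun y => decide (y < PySem.List.pyGetD L i 0)) : Int))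
    (by
      intro acc x hx
      have hx' := PySem.List.mem_pyRange_one.1 hx
      exact hinner x acc hx'.1)
  rw [houter]
  rw [PySem.List.foldl_add (g := fun i =>
    ((L.drop (i + 1).toNat).countP (fun y => decide (y < PySem.List.pyGetD L i 0)) : Int))]
  rw [zero_add, PySem.List.pyRange_one, List.map_map]
  have hn : ((L.length : Int) - 0).toNat = Q.length := by omega
  rw [hn]
  have hbody : ∀ k, k < Q.length →
      ((L.drop (((0 : Int) + (k : Nat)) + 1).toNat).countP
        (fun y => decide (y < PySem.List.pyGetD L ((0 : Int) + (k : Nat)) 0)) : Int) =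
      (((Q.drop (k + 1)).countP (fun y => decide (y < Q.getD k 0)) : Nat) : Int) := by
    intro k hk
    have h1 : PySem.List.pyGetD L ((0 : Int) + (k : Nat)) 0 = ((Q.getD k 0 : Nat) : Int) := by
      rw [zero_add, PySem.List.pyGetD_natCast, hL]
      have : ((0 : Int)) = (((0 : Nat) : Int)) := rfl
      rw [this, List.getD_map]
    have h2 : (((0 : Int) + (k : Nat)) + 1).toNat = k + 1 := by omega
    rw [h1, h2, hL, ← List.map_drop, List.countP_map]
    congr 1
    apply List.countP_congr
    intro y _
    simp
  calc ((List.range Q.length).map (fun k =>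
        ((L.drop (((0 : Int) + (k : Nat)) + 1).toNat).countP
          (fun y => decide (y < PySem.List.pyGetD L ((0 : Int) + (k : Nat)) 0)) : Int))).sum
      = ((List.range Q.length).map (fun k =>
          (((Q.drop (k + 1)).countP (fun y => decide (y < Q.getD k 0)) : Nat) : Int))).sum := by
        exact congrArg List.sum (List.map_congr_left
          (fun k hk => hbody k (List.mem_range.1 hk)))
    _ = (invNat Q : Int) := by
        rw [sum_map_cast (List.range Q.length)
          (fun k => (Q.drop (k + 1)).countP (fun y => decide (y < Q.getD k 0))), invNat_eq_sum]

theorem dp_mem_iff (bra ket : List Int) (m : Nat) :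
    ((m : Int) ∈ ((PySem.List.enumerate bra 0).filter
      (fun p => !decide (p.2 ∈ ket))).map (fun p => p.1)) ↔
    (m < bra.length ∧ bra.getD m 0 ∉ ket) := by
  constructor
  · intro hm
    obtain ⟨p, hp, hp1⟩ := List.mem_map.1 hm
    obtain ⟨hpe, hpf⟩ := List.mem_filter.1 hp
    obtain ⟨k, hk, hpk⟩ := (PySem.List.mem_enumerate_iff _ _ _).1 hpe
    subst hpk
    simp only [zero_add] at hp1 hpf
    have hkm : k = m := by exact_mod_cast hp1
    subst hkm
    refine ⟨hk, ?_⟩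
    rw [List.getD_eq_getElem (hn := hk)]
    simpa using hpf
  · rintro ⟨hm, hnot⟩
    apply List.mem_map.2
    refine ⟨((m : Int), bra[m]), ?_, by simp⟩
    apply List.mem_filter.2
    refine ⟨(PySem.List.mem_enumerate_iff _ _ _).2 ⟨m, hm, by simp⟩, ?_⟩
    rw [List.getD_eq_getElem (hn := hm)] at hnot
    simpa using hnot

theorem dp_elem (bra ket : List Int) (p : Int)
    (hp : p ∈ ((PySem.List.enumerate bra 0).filter
      (fun q => !decide (q.2 ∈ ket))).map (fun q => q.1)) :
    ∃ k : Nat, p = (k : Int) ∧ k < bra.length ∧ bra.getD k 0 ∉ ket := by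
  obtain ⟨q, hq, hq1⟩ := List.mem_map.1 hp
  obtain ⟨hqe, hqf⟩ := List.mem_filter.1 hq
  obtain ⟨k, hk, hqk⟩ := (PySem.List.mem_enumerate_iff _ _ _).1 hqe
  subst hqk
  simp only [zero_add] at hq1 hqf
  refine ⟨k, hq1.symm, hk, ?_⟩
  rw [List.getD_eq_getElem (hn := hk)]
  simpa using hqf

-- ===== VERDICT (by name: the statement is the Claim_ definition above) =====
theorem maxCoinc_spec : Claim_equal_maxCoinc := by
  intro bra ket hdom hpre
  unfold Spec_maxCoinc
  by_cases heq : bra = ket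
  · simp only [maxCoinc, maxCoinc_alt, if_pos heq]
  · have hfiltB : bra.filter (fun x => !(PySem.Set.contains (PySem.Set.ofList ket) x)) =
        bra.filter (fun x => !decide (x ∈ ket)) :=
      List.filter_congr (fun x _ => by rw [contains_ofList_eq])
    have hfiltB2 : (PySem.List.enumerate bra 0).filter
          (fun p => !(PySem.Set.contains (PySem.Set.ofList ket) p.2)) =
        (PySem.List.enumerate bra 0).filter (fun p => !decide (p.2 ∈ ket)) :=
      List.filter_congr (fun p _ => by rw [contains_ofList_eq])
    have hfiltB3 : bra.filter (fun x => PySem.Set.contains (PySem.Set.ofList ket) x) =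
        bra.filter (fun x => decide (x ∈ ket)) :=
      List.filter_congr (fun x _ => by rw [contains_ofList_eq])
    have hcount_eq : (bra.filter (fun x => decide (x ∉ ket))).length =
        (bra.filter (fun x => !decide (x ∈ ket))).length := by
      congr 1
      exact List.filter_congr (fun x _ => by simp)
    by_cases h3 : 3 ≤ (bra.filter (fun x => !decide (x ∈ ket))).length
    · have hAc : mcCountA ket bra 0 = none := by
        rw [mcCountA_eq ket bra 0 (by omega) (by omega), if_neg (by
          rw [hcount_eq]; omega)]
      simp only [maxCoinc, maxCoinc_alt, if_neg heq]
      rw [hAc, hfiltB, if_pos h3]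
    · -- well-formed determinants: the full correspondence
      obtain ⟨hlen, hndb, hndk⟩ : bra.length = ket.length ∧ bra.Nodup ∧ ket.Nodup := by
        rcases hpre with h | h | h
        · exact absurd h heq
        · exact absurd (hcount_eq ▸ h) h3
        · exact h
      -- chain-endpoint values of the original ket (the tv of the lemmas)
      have hch0 : ∀ p, p < bra.length → bra.getD p 0 ∉ ket →
          wval bra ket bra.length p = some ((wval bra ket bra.length p).getD 0) := by
        intro p hp hnk
        obtain ⟨v, hv⟩ := wval_exists bra ket hndk hlen.symm p (by omega) hnk
        rw [← hlen] at hv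
        rw [hv]
        rfl
      have hchar := mcSwapA_char bra ket hndb (fun p => (wval bra ket bra.length p).getD 0)
        (bra.filter (fun soBra => decide (soBra ∈ ket))) ket 1 hndk (List.Perm.refl ket)
        hlen.symm
        (fun e he => (List.mem_filter.1 he).1)
        (fun e he => by simpa using (List.mem_filter.1 he).2)
        (fun e heb hek hnot => absurd (List.mem_filter.2 ⟨heb, by simpa using hek⟩) hnot)
        hch0
      obtain ⟨hrnd, hrperm, hrplaced, hrchain⟩ := hchar
      set r := (mcSwapA bra (bra.filter (fun soBra => decide (soBra ∈ ket))) ket 1).1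
        with hrdef
      have hrlen : r.length = ket.length := hrperm.length_eq
      have hrident : ∀ m, m < bra.length → bra.getD m 0 ∈ ket → r.getD m 0 = bra.getD m 0 := by
        intro m hm hmk
        have hidx : PySem.List.index? bra (bra.getD m 0) = some m := by
          rw [List.getD_eq_getElem (hn := hm)]
          exact index?_nodup_getElem bra hndb m hm
        have hpl := hrplaced (bra.getD m 0)
          (by rw [List.getD_eq_getElem (hn := hm)]; exact List.getElem_mem hm) hmk
        rw [hidx, Option.getD_some] at hpl
        exact hpl
      have hrdiff_notin : ∀ m, m < bra.length → bra.getD m 0 ∉ ket → r.getD m 0 ∉ bra := by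
        intro m hm hnk hmem
        have hmr : m < r.length := by omega
        have huket : r.getD m 0 ∈ ket := by
          rw [List.getD_eq_getElem (hn := hmr)]
          exact hrperm.mem_iff.1 (List.getElem_mem hmr)
        obtain ⟨k, hk⟩ : ∃ k, PySem.List.index? bra (r.getD m 0) = some k :=
          Option.isSome_iff_exists.1 ((PySem.List.index?_isSome_iff _ _).2 hmem)
        obtain ⟨hkb, hbk, -⟩ := PySem.List.getElem_of_index?_eq_some hk
        have hpl := hrplaced (r.getD m 0) hmem huket
        rw [hk, Option.getD_some] at hpl
        have hkm : k = m := by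
          apply (List.Nodup.getElem_inj_iff hrnd).1
          rw [← List.getD_eq_getElem (hn := by omega), ← List.getD_eq_getElem (hn := hmr)]
          exact hpl
        subst hkm
        apply hnk
        rw [List.getD_eq_getElem (hn := hm), hbk]
        exact huket
      have hrdiff : ∀ m, m < bra.length → bra.getD m 0 ∉ ket →
          r.getD m 0 = (wval bra ket bra.length m).getD 0 := by
        intro m hm hnk
        have hch := hrchain m hm hnk
        have hnone : PySem.List.index? bra (r.getD m 0) = none :=
          (PySem.List.index?_eq_none_iff _ _).2 (hrdiff_notin m hm hnk)
        rw [wval_step_none bra r m hnone bra.length] at hch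
        exact Option.some.inj hch
      -- B's target list equals A's final auxKet
      have hdpb : ∀ p ∈ ((PySem.List.enumerate bra 0).filter
          (fun p => !decide (p.2 ∈ ket))).map (fun p => p.1), 0 ≤ p ∧ p.toNat < bra.length := by
        intro p hp
        obtain ⟨k, rfl, hk, -⟩ := dp_elem bra ket p hp
        exact ⟨by omega, by simpa using hk⟩
      have hgm : ∀ m, m < bra.length → bra.getD m 0 ∉ ket →
          PySem.List.pyGetD ket (mcChainB ket (mcPosDict bra) ket.length (m : Int)) 0 =
          (wval bra ket bra.length m).getD 0 :=
        fun m hm hnk => mcChainB_eq bra ket hndb hlen.symm bra.length m _ (by omega)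
          (hch0 m hm hnk) ket.length (by omega)
      have hTr : (((PySem.List.enumerate bra 0).filter
            (fun p => !decide (p.2 ∈ ket))).map (fun p => p.1)).foldl
          (fun t p => t.set p.toNat
            (PySem.List.pyGetD ket (mcChainB ket (mcPosDict bra) ket.length p) 0)) bra = r := by
        have hfold := foldl_set_getD
          (fun p => PySem.List.pyGetD ket (mcChainB ket (mcPosDict bra) ket.length p) 0)
          (((PySem.List.enumerate bra 0).filter
            (fun p => !decide (p.2 ∈ ket))).map (fun p => p.1)) bra
        apply List.ext_getElem (by rw [(hfold 0 hdpb).2]; omega)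
        intro m hm1 hm2
        have hmb : m < bra.length := by rw [(hfold 0 hdpb).2] at hm1; exact hm1
        rw [← List.getD_eq_getElem (d := 0), ← List.getD_eq_getElem (d := 0),
          (hfold m hdpb).1]
        by_cases hmk : bra.getD m 0 ∈ ket
        · rw [if_neg (fun hc => ((dp_mem_iff bra ket m).1 hc).2 hmk), hrident m hmb hmk]
        · rw [if_pos ((dp_mem_iff bra ket m).2 ⟨hmb, hmk⟩), hgm m hmb hmk,
            hrdiff m hmb hmk]
      -- A's extraction loop
      have hrange : PySem.List.pyRange 0 (bra.length : Int) 1 =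
          (List.range bra.length).map (fun k => ((0:Int) + (k : Nat))) := by
        rw [PySem.List.pyRange_one]
        simp
      -- the sign
      have hsign := mcSwapA_sign bra r hndb hrnd
        (bra.filter (fun soBra => decide (soBra ∈ ket))) ket 1 hndk hrperm.symm hlen.symm
        (fun e he => (List.mem_filter.1 he).1)
        (fun e he => by simpa using (List.mem_filter.1 he).2)
      have hparr : mcPar r r = 1 := by
        rw [mcPar, qlist_self r hrnd, invNat_of_pairwise _ List.pairwise_lt_range, pow_zero]
      have hsgnA : (mcSwapA bra (bra.filter (fun soBra => decide (soBra ∈ ket))) ket 1).2 =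
          mcPar r ket := by
        have h := hsign
        rw [← hrdef, hparr, mul_one, one_mul] at h
        exact h
      have hpermB : ket.map (fun v => (mcPosDict r).getD v 0) =
          (qlist r ket).map (fun k : Nat => (k : Int)) := by
        rw [qlist, List.map_map]
        apply List.map_congr_left
        intro v hv
        obtain ⟨k, hk⟩ : ∃ k, PySem.List.index? r v = some k :=
          Option.isSome_iff_exists.1
            ((PySem.List.index?_isSome_iff _ _).2 (hrperm.mem_iff.2 hv))
        simp only [Function.comp]
        rw [PySem.Dict.getD_eq_get?_getD, mcPosDict_get? r hrnd v, hk]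
        rfl
      -- assemble both sides
      have hAc : mcCountA ket bra 0 =
          some (0 + ((bra.filter (fun x => decide (x ∉ ket))).length : Int)) := by
        rw [mcCountA_eq ket bra 0 (by omega) (by omega), if_pos (by
          rw [hcount_eq]; omega)]
      have hf1 : bra.filter (fun x => !decide (x ∈ r)) =
          bra.filter (fun x => !decide (x ∈ ket)) :=
        List.filter_congr (fun x _ => by simp [hrperm.mem_iff])
      have hf2 : (PySem.List.enumerate bra 0).filter (fun p => !decide (p.2 ∈ r)) =
          (PySem.List.enumerate bra 0).filter (fun p => !decide (p.2 ∈ ket)) :=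
        List.filter_congr (fun p _ => by simp [hrperm.mem_iff])
      simp only [maxCoinc, maxCoinc_alt, if_neg heq]
      rw [hAc]
      simp only []
      rw [hfiltB, if_neg h3, hfiltB2, hfiltB3, ← hrdef, hsgnA]
      rw [hrange, mcExtract_gen bra r bra.length le_rfl [] []]
      simp only [List.take_length, List.nil_append]
      rw [hf1, hf2, hTr, hpermB, invLoop_eq (qlist r ket), neg_one_pow_if, List.map_map]
      rw [zero_add, hcount_eq]
      rfl
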